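-- pv_equiv track=rewrite | github.com/bssam1996/LeetCode-Problems | Solutions/greatest-common-divisor-of-strings.py | gcdOfStrings2
-- ===== SOURCE A (Python) =====
-- def gcdOfStrings2(str1, str2):
--     # Method 2 - Runtime 34 ms, Memory 13.9 MB
--     if len(str1) < len(str2):
--         shorter_string = str1
--         longer_string = str2
--     else:
--         shorter_string = str2
--         longer_string = str1
--     list_of_possibilities = [1]
--     for counter in range(2, int(len(shorter_string) / 2) + 1):
--         if len(shorter_string) % counter == 0:
--             list_of_possibilities.append(counter)
--     list_of_possibilities.append(len(shorter_string))
--     gcd = 0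
--     for value in list_of_possibilities[-1::-1]:
--         if len(longer_string) % value == 0:
--             gcd = value
--             break
--     if gcd != 0:
--         partial_string = shorter_string[:gcd]
--         number_of_times_longer = int(len(longer_string) / len(partial_string))
--         number_of_times_shorter = int(len(shorter_string) / len(partial_string))
--         if longer_string != (partial_string * number_of_times_longer) or shorter_string != (partial_string * number_of_times_shorter):
--             return ""
--     return shorter_string[:gcd]
-- ===== SOURCE B (Python) =====
-- def gcdOfStrings2(str1, str2):
--     if len(str1) < len(str2):
--         shorter, longer = str1, str2
--     else:
--         shorter, longer = str2, str1
--     # Euclid's algorithm on the lengths instead of enumerating divisors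
--     a, b = len(shorter), len(longer)
--     while b:
--         a, b = b, a % b
--     base = shorter[:a]
--     if longer == base * (len(longer) // len(base)) and shorter == base * (len(shorter) // len(base)):
--         return base
--     return ""
-- ===== Notes on version B (the rewrite author's own statement) =====
-- stated objective: faster
-- what changed: B computes the gcd of the two lengths with Euclid's algorithm instead of A's enumeration of all divisors of the shorter length followed by a backwards scan for one dividing the longer length; the repetition validation stays.
import Mathlib
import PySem

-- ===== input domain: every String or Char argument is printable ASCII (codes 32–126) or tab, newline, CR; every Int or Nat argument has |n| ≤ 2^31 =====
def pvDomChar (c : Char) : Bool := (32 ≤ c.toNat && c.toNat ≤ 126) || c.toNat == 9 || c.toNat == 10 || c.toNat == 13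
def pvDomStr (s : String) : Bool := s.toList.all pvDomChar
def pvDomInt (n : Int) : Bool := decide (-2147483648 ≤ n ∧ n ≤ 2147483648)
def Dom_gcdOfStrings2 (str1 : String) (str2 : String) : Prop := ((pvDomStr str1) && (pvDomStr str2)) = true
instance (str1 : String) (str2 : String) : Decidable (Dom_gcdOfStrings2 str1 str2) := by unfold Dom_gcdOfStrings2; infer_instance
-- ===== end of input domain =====

-- B replaces A's divisor enumeration (build all divisors of the shorter length, scan them
-- backwards for one dividing the longer length) by Euclid's algorithm on the two lengths
-- (measured faster in a timing run); the validation by repetition stays.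

-- ===== PORT A =====
-- the second loop of A: scan, break at the first value dividing m (gcd stays 0 if none divides)
def pvScanA (m : Int) : List Int → Int
  | [] => 0
  | v :: rest => if PySem.Int.mod m v == 0 then v else pvScanA m rest

def gcdOfStrings2 (str1 : String) (str2 : String) : String :=
  let s1 := str1.toList
  let s2 := str2.toList
  let shorter := if s1.length < s2.length then s1 else s2
  let longer  := if s1.length < s2.length then s2 else s1
  let lenS : Int := shorter.length
  let lenL : Int := longer.length
  -- int(len(shorter)/2) is truncating division of nonnegative ints
  let lop : List Int :=
    (PySem.List.pyRange 2 (PySem.Int.truncdiv lenS 2 + 1) 1).foldl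
      (fun acc c => if PySem.Int.mod lenS c == 0 then acc ++ [c] else acc) [1]
  let lop := lop ++ [lenS]
  -- list_of_possibilities[-1::-1] reverses the list
  let gcd : Int := pvScanA lenL lop.reverse
  if gcd ≠ 0 then
    let partialStr := PySem.List.slice shorter none (some gcd)
    let numL : Int := PySem.Int.truncdiv lenL (partialStr.length : Int)
    let numS : Int := PySem.Int.truncdiv lenS (partialStr.length : Int)
    if longer ≠ PySem.List.pyRepeat partialStr numL ∨ shorter ≠ PySem.List.pyRepeat partialStr numS then
      String.ofList []
    else
      String.ofList (PySem.List.slice shorter none (some gcd))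
  else
    String.ofList (PySem.List.slice shorter none (some gcd))

-- ===== PORT B =====
-- the while-loop of Source B: while b: a, b = b, a % b
def pvEuclid (a b : Nat) : Nat :=
  if b = 0 then a else pvEuclid b (a % b)
decreasing_by exact Nat.mod_lt _ (Nat.pos_of_ne_zero (by assumption))

def gcdOfStrings2_alt (str1 : String) (str2 : String) : String :=
  let s1 := str1.toList
  let s2 := str2.toList
  let shorter := if s1.length < s2.length then s1 else s2
  let longer  := if s1.length < s2.length then s2 else s1
  let g : Nat := pvEuclid shorter.length longer.length
  let base := PySem.List.slice shorter none (some (g : Int))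
  if longer = PySem.List.pyRepeat base (PySem.Int.floordiv (longer.length : Int) (base.length : Int))
     ∧ shorter = PySem.List.pyRepeat base (PySem.Int.floordiv (shorter.length : Int) (base.length : Int)) then
    String.ofList base
  else
    String.ofList []

-- ===== PRECONDITION & SPEC =====
-- Pre_ excludes exactly the inputs where either string is empty: there both A and B raise
-- ZeroDivisionError (A via `len(longer) % 0`, B via `// len(base)` with an empty base).
def Pre_gcdOfStrings2 (str1 : String) (str2 : String) : Prop :=
  str1.toList ≠ [] ∧ str2.toList ≠ []
instance (str1 : String) (str2 : String) : Decidable (Pre_gcdOfStrings2 str1 str2) := by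
  unfold Pre_gcdOfStrings2; infer_instance

def pvWitness_gcdOfStrings2 : String × String := ("abab", "ab")

def Spec_gcdOfStrings2 (str1 : String) (str2 : String) (out : String) : Prop := out = gcdOfStrings2_alt str1 str2
instance (str1 : String) (str2 : String) (out : String) : Decidable (Spec_gcdOfStrings2 str1 str2 out) := by unfold Spec_gcdOfStrings2; infer_instance

-- ===== CLAIM (what is proved, stated in full; the proofs are below) =====
def Claim_equal_gcdOfStrings2 : Prop := ∀ (str1 : String) (str2 : String), Dom_gcdOfStrings2 str1 str2 → Pre_gcdOfStrings2 str1 str2 → Spec_gcdOfStrings2 str1 str2 (gcdOfStrings2 str1 str2)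

-- ===== LEMMAS AND PROOFS =====

theorem pvEuclid_eq_gcd (a b : Nat) : pvEuclid a b = Nat.gcd b a := by
  fun_induction pvEuclid
  · simp
  · next a b h ih => rw [ih]; exact (Nat.gcd_rec b a).symm

theorem pvScanA_eq (m g : Int) (xs : List Int)
    (hmem : g ∈ xs) (hg : PySem.Int.mod m g = 0)
    (hmax : ∀ x ∈ xs, PySem.Int.mod m x = 0 → x ≤ g)
    (hsorted : xs.Pairwise (· ≥ ·)) :
    pvScanA m xs = g := by
  induction xs with
  | nil => simp at hmem
  | cons v rest ih =>
    rw [List.pairwise_cons] at hsorted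
    simp only [pvScanA]
    by_cases hv : PySem.Int.mod m v = 0
    · simp only [hv, beq_self_eq_true, if_true]
      have hle : v ≤ g := hmax v (List.mem_cons_self ..) hv
      rcases List.mem_cons.mp hmem with h | h
      · omega
      · exact le_antisymm hle (hsorted.1 g h)
    · have hne : (PySem.Int.mod m v == 0) = false := by simpa using hv
      rw [hne, if_neg (by simp)]
      have hgv : g ≠ v := fun h => hv (h ▸ hg)
      exact ih (List.mem_cons.mp hmem |>.resolve_left hgv)
        (fun x hx h => hmax x (List.mem_cons_of_mem _ hx) h) hsorted.2

theorem pv_core (sh lo : List Char) (hs : sh ≠ []) (hl : lo ≠ []) :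
    (let lenS : Int := sh.length
     let lenL : Int := lo.length
     let lop : List Int :=
       (PySem.List.pyRange 2 (PySem.Int.truncdiv lenS 2 + 1) 1).foldl
         (fun acc c => if PySem.Int.mod lenS c == 0 then acc ++ [c] else acc) [1]
     let lop := lop ++ [lenS]
     let gcd : Int := pvScanA lenL lop.reverse
     if gcd ≠ 0 then
       let partialStr := PySem.List.slice sh none (some gcd)
       let numL : Int := PySem.Int.truncdiv lenL (partialStr.length : Int)
       let numS : Int := PySem.Int.truncdiv lenS (partialStr.length : Int)
       if lo ≠ PySem.List.pyRepeat partialStr numL ∨ sh ≠ PySem.List.pyRepeat partialStr numS then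
         String.ofList []
       else
         String.ofList (PySem.List.slice sh none (some gcd))
     else
       String.ofList (PySem.List.slice sh none (some gcd))) =
    (let g : Nat := pvEuclid sh.length lo.length
     let base := PySem.List.slice sh none (some (g : Int))
     if lo = PySem.List.pyRepeat base (PySem.Int.floordiv (lo.length : Int) (base.length : Int))
        ∧ sh = PySem.List.pyRepeat base (PySem.Int.floordiv (sh.length : Int) (base.length : Int)) then
       String.ofList base
     else
       String.ofList []) := by
  have hn : 0 < sh.length := List.length_pos_iff.mpr hs
  have hm : 0 < lo.length := List.length_pos_iff.mpr hl
  set n := sh.length with hndef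
  set m := lo.length with hmdef
  set g := Nat.gcd n m with hgdef
  have hg : 0 < g := Nat.gcd_pos_of_pos_left _ hn
  have hgn : g ≤ n := Nat.le_of_dvd hn (Nat.gcd_dvd_left _ _)
  have hdvdn : g ∣ n := Nat.gcd_dvd_left _ _
  have hdvdm : g ∣ m := Nat.gcd_dvd_right _ _
  -- the candidate list is [1] ++ (divisors of n in [2, n/2]) ++ [n]
  have htd : PySem.Int.truncdiv (n : Int) 2 = ((n / 2 : Nat) : Int) := by
    simp [PySem.Int.truncdiv]
  have hlop : (PySem.List.pyRange 2 (PySem.Int.truncdiv (n : Int) 2 + 1) 1).foldl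
        (fun acc c => if PySem.Int.mod (n : Int) c == 0 then acc ++ [c] else acc) [1] ++ [(n : Int)]
      = 1 :: (((PySem.List.pyRange 2 (((n / 2 : Nat) : Int) + 1) 1).filter
          (fun c => PySem.Int.mod (n : Int) c == 0)) ++ [(n : Int)]) := by
    rw [htd]
    rw [show (fun (acc : List Int) (c : Int) => if PySem.Int.mod (n : Int) c == 0 then acc ++ [c] else acc)
        = (fun acc c => if (fun c => PySem.Int.mod (n : Int) c == 0) c then acc ++ [id c] else acc) from rfl]
    rw [PySem.List.foldl_append_if]
    simp
  set F := (PySem.List.pyRange 2 (((n / 2 : Nat) : Int) + 1) 1).filter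
      (fun c => PySem.Int.mod (n : Int) c == 0) with hFdef
  -- every element of the candidate list is a positive divisor of n
  have helem : ∀ x ∈ (1 : Int) :: (F ++ [(n : Int)]), 1 ≤ x ∧ x ∣ (n : Int) := by
    intro x hx
    rcases List.mem_cons.mp hx with rfl | hx
    · exact ⟨le_refl _, one_dvd _⟩
    rcases List.mem_append.mp hx with hx | hx
    · have h1 := (List.mem_filter.mp hx).1
      have h2 := (List.mem_filter.mp hx).2
      have hr := (PySem.List.mem_pyRange_one).mp h1
      exact ⟨by omega, (PySem.Int.mod_eq_zero_iff_dvd _ _).mp (by simpa using h2)⟩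
    · simp only [List.mem_singleton] at hx
      exact ⟨by omega, hx ▸ dvd_refl _⟩
  -- g is in the candidate list
  have hmem : (g : Int) ∈ (1 : Int) :: (F ++ [(n : Int)]) := by
    by_cases hg1 : g = 1
    · simp [hg1]
    by_cases hgn' : g = n
    · simp [hgn']
    · -- 2 ≤ g and g ≤ n / 2
      have hglt : g < n := lt_of_le_of_ne hgn hgn'
      have hhalf : g ≤ n / 2 := by
        obtain ⟨k, hk⟩ := hdvdn
        have hk2 : 2 ≤ k := by
          rcases Nat.lt_or_ge k 2 with h | h
          · interval_cases k <;> omega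
          · exact h
        have : g * 2 ≤ n := by calc g * 2 ≤ g * k := by exact Nat.mul_le_mul_left g hk2
                                   _ = n := hk.symm
        omega
      refine List.mem_cons_of_mem _ (List.mem_append.mpr (Or.inl ?_))
      rw [hFdef]
      refine List.mem_filter.mpr ⟨(PySem.List.mem_pyRange_one).mpr ⟨by omega, by omega⟩, ?_⟩
      simp only [PySem.Int.mod_natCast, beq_iff_eq]
      exact_mod_cast Nat.dvd_iff_mod_eq_zero.mp hdvdn
  -- g divides m (as the scan's test)
  have hgm : PySem.Int.mod (m : Int) (g : Int) = 0 := by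
    simp only [PySem.Int.mod_natCast]
    exact_mod_cast Nat.dvd_iff_mod_eq_zero.mp hdvdm
  -- g is the largest candidate dividing m
  have hmax : ∀ x ∈ (1 : Int) :: (F ++ [(n : Int)]), PySem.Int.mod (m : Int) x = 0 → x ≤ (g : Int) := by
    intro x hx hxm
    obtain ⟨hx1, hxn⟩ := helem x hx
    obtain ⟨x', rfl⟩ : ∃ k : Nat, x = (k : Int) := ⟨x.toNat, (Int.toNat_of_nonneg (by omega)).symm⟩
    have hxm' : (x' : Int) ∣ (m : Int) := (PySem.Int.mod_eq_zero_iff_dvd _ _).mp hxm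
    have : x' ∣ g := by
      have := Int.dvd_gcd hxn hxm'
      rwa [Int.gcd_natCast_natCast] at this
    exact_mod_cast Nat.le_of_dvd hg this
  -- the candidate list is sorted ascending
  have hsorted : List.Pairwise (· ≤ ·) ((1 : Int) :: (F ++ [(n : Int)])) := by
    refine List.pairwise_cons.mpr ⟨fun x hx => (helem x (List.mem_cons_of_mem _ hx)).1, ?_⟩
    refine List.pairwise_append.mpr ⟨?_, List.pairwise_singleton _ _, ?_⟩
    · exact ((PySem.List.pairwise_lt_pyRange_one 2 _).filter _).imp le_of_lt
    · intro x hx y hy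
      simp only [List.mem_singleton] at hy
      subst hy
      have hr := (PySem.List.mem_pyRange_one).mp (List.mem_filter.mp hx).1
      have : (((n / 2 : Nat) : Int)) ≤ (n : Int) := by exact_mod_cast Nat.div_le_self n 2
      omega
  have hscan : pvScanA (m : Int) ((1 : Int) :: (F ++ [(n : Int)])).reverse = (g : Int) := by
    refine pvScanA_eq _ _ _ (List.mem_reverse.mpr hmem) hgm
      (fun x hx h => hmax x (List.mem_reverse.mp hx) h) ?_
    rw [List.pairwise_reverse]
    exact hsorted.imp (fun h => h)
  -- now reduce both sides
  simp only [hlop, hscan]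
  rw [pvEuclid_eq_gcd, Nat.gcd_comm m n, ← hgdef]
  have hgne : ((g : Int) ≠ 0) := by exact_mod_cast Nat.pos_iff_ne_zero.mp hg
  simp only [if_pos hgne, PySem.List.slice_to_natCast]
  have hlen : (sh.take g).length = g := by
    rw [List.length_take]; omega
  rw [hlen]
  have htdm : PySem.Int.truncdiv (m : Int) (g : Int) = ((m / g : Nat) : Int) := by
    simp [PySem.Int.truncdiv]
  have htdn : PySem.Int.truncdiv (n : Int) (g : Int) = ((n / g : Nat) : Int) := by
    simp [PySem.Int.truncdiv]
  rw [htdm, htdn, PySem.Int.floordiv_natCast, PySem.Int.floordiv_natCast]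
  split_ifs with h1 h2 <;> first | rfl | tauto

-- ===== VERDICT (by name: the statement is the Claim_ definition above) =====
theorem gcdOfStrings2_spec : Claim_equal_gcdOfStrings2 := by
  intro str1 str2 _ hpre
  obtain ⟨h1, h2⟩ := hpre
  unfold Spec_gcdOfStrings2 gcdOfStrings2 gcdOfStrings2_alt
  by_cases hlt : str1.toList.length < str2.toList.length
  · simp only [if_pos hlt]
    exact pv_core _ _ h1 h2
  · simp only [if_neg hlt]
    exact pv_core _ _ h2 h1
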